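-- pv_equiv track=rewrite | github.com/h-j-han/automatic_explicitation | autoexpl/utils.py | proximity_filter_entitychunk
-- ===== SOURCE A (Python) =====
-- from typing import List, Tuple, Dict, Union
--
-- def proximity_filter_entitychunk(
--     la: List[Tuple[int, int, str]], lb: List[int], threshold=3
-- ) -> Tuple[List[Tuple[int, int, str]], List[List[int]], List[bool]]:
--     new_la = []
--     new_lb = []
--     # possible_explanandum : unaligned is not included and closely located with unalinged.
--     l_unaligned_not_included = []
--     for a in la:
--         unaligned_not_included = True
--         s, e, t = a
--         tmp = []
--         for b in lb:
--             if (s <= b and b <= e) or min(abs(s - b), abs(e - b)) < threshold: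
--                 tmp.append(b)
--                 if s <= b and b <= e:
--                     unaligned_not_included = False
--         if len(tmp):
--             new_la.append(a)
--             new_lb.append(tmp)
--             l_unaligned_not_included.append(unaligned_not_included)
--     return new_la, new_lb, l_unaligned_not_included
-- ===== SOURCE B (Python) =====
-- from bisect import bisect_left, bisect_right
-- from typing import List, Tuple
--
--
-- def proximity_filter_entitychunk(
--     la: List[Tuple[int, int, str]], lb: List[int], threshold=3
-- ) -> Tuple[List[Tuple[int, int, str]], List[List[int]], List[bool]]:
--     # Sort the points once together with their original positions; per entity the
--     # match condition is a union of at most three contiguous value ranges, each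
--     # found by binary search; matches are re-ordered by original position.
--     pairs = sorted(enumerate(lb), key=lambda p: p[1])
--     vals = [b for _, b in pairs]
--     new_la, new_lb, flags = [], [], []
--     for a in la:
--         s, e = a[0], a[1]
--         ranges = [(s, e)] if s <= e else []
--         if threshold >= 1:
--             ranges.append((s - threshold + 1, s + threshold - 1))
--             ranges.append((e - threshold + 1, e + threshold - 1))
--         hits = set()
--         for lo, hi in ranges:
--             hits.update(pairs[bisect_left(vals, lo):bisect_right(vals, hi)])
--         if hits:
--             new_la.append(a)
--             new_lb.append([b for _, b in sorted(hits, key=lambda p: p[0])])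
--             flags.append(not bisect_left(vals, s) < bisect_right(vals, e))
--     return new_la, new_lb, flags
-- ===== Notes on version B (the rewrite author's own statement) =====
-- stated objective: faster
-- what changed: Instead of scanning all of lb for every entity, B sorts lb once with original indices, rewrites the proximity test as membership in a union of at most three contiguous value ranges, binary-searches each range, and re-orders the per-entity matches by original position.
import Mathlib
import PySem

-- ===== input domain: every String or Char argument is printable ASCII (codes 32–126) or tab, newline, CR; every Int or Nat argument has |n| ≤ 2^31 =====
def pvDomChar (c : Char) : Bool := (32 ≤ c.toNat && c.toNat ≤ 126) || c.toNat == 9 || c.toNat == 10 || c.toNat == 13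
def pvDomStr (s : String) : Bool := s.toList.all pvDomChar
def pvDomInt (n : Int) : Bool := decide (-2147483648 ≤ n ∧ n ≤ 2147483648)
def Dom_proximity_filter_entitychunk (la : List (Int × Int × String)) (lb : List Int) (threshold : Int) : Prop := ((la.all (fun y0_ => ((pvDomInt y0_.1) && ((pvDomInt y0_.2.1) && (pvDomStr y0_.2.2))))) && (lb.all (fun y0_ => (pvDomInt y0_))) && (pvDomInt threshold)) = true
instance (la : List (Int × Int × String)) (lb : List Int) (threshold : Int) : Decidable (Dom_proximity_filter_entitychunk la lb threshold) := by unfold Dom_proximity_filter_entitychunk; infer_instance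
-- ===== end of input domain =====

-- B replaces A's per-entity scan of all points by one sort of the points and per-entity
-- binary searches over a union of at most three contiguous value ranges (objective: faster).

-- ===== PORT A =====
-- one step of A's outer loop: the inner loop over lb collects tmp and the unaligned flag
def pvStepA (lb : List Int) (threshold : Int)
    (st : (List (Int × Int × String)) × List (List Int) × List Bool) (a : Int × Int × String) :
    (List (Int × Int × String)) × List (List Int) × List Bool :=
  let r := lb.foldl (fun tu b =>
    if (a.1 ≤ b ∧ b ≤ a.2.1) ∨ min |a.1 - b| |a.2.1 - b| < threshold then
      (tu.1 ++ [b], if a.1 ≤ b ∧ b ≤ a.2.1 then false else tu.2)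
    else tu) ([], true)
  if r.1.length ≠ 0 then (st.1 ++ [a], st.2.1 ++ [r.1], st.2.2 ++ [r.2]) else st

def proximity_filter_entitychunk (la : List (Int × Int × String)) (lb : List Int) (threshold : Int) : (List (Int × Int × String)) × List (List Int) × List Bool :=
  la.foldl (pvStepA lb threshold) ([], [], [])

-- ===== PORT B =====
-- pairs = sorted(enumerate(lb), key=lambda p: p[1])
def pvPairs (lb : List Int) : List (Int × Int) :=
  PySem.List.sorted (PySem.List.enumerate lb) (fun p => p.2)

-- ranges = [(s, e)] if s <= e else []; if threshold >= 1: append the two near-ranges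
def pvRanges (s e t : Int) : List (Int × Int) :=
  (if s ≤ e then [(s, e)] else []) ++
    (if 1 ≤ t then [(s - t + 1, s + t - 1), (e - t + 1, e + t - 1)] else [])

-- pairs[bisect_left(vals, lo):bisect_right(vals, hi)]
def pvSeg (pairs : List (Int × Int)) (vals : List Int) (lo hi : Int) : List (Int × Int) :=
  PySem.List.slice pairs (some ((PySem.List.bisectLeft vals lo : Nat) : Int))
    (some ((PySem.List.bisectRight vals hi : Nat) : Int))

-- hits = set(); for lo, hi in ranges: hits.update(pairs[...:...])
def pvHits (pairs : List (Int × Int)) (vals : List Int) (rs : List (Int × Int)) : PySem.Set (Int × Int) :=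
  rs.foldl (fun h r => PySem.Set.update h (pvSeg pairs vals r.1 r.2)) PySem.Set.empty

-- one step of B's outer loop
def pvStepB (pairs : List (Int × Int)) (vals : List Int) (threshold : Int)
    (st : (List (Int × Int × String)) × List (List Int) × List Bool) (a : Int × Int × String) :
    (List (Int × Int × String)) × List (List Int) × List Bool :=
  if pvHits pairs vals (pvRanges a.1 a.2.1 threshold) ≠ [] then
    (st.1 ++ [a],
     st.2.1 ++ [(PySem.List.sorted (pvHits pairs vals (pvRanges a.1 a.2.1 threshold)) (fun p => p.1)).map (fun p => p.2)],
     st.2.2 ++ [decide (¬ PySem.List.bisectLeft vals a.1 < PySem.List.bisectRight vals a.2.1)])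
  else st

def proximity_filter_entitychunk_alt (la : List (Int × Int × String)) (lb : List Int) (threshold : Int) : (List (Int × Int × String)) × List (List Int) × List Bool :=
  la.foldl (pvStepB (pvPairs lb) ((pvPairs lb).map (fun p => p.2)) threshold) ([], [], [])

-- ===== PRECONDITION & SPEC =====
def Spec_proximity_filter_entitychunk (la : List (Int × Int × String)) (lb : List Int) (threshold : Int) (out : (List (Int × Int × String)) × List (List Int) × List Bool) : Prop := out = proximity_filter_entitychunk_alt la lb threshold
instance (la : List (Int × Int × String)) (lb : List Int) (threshold : Int) (out : (List (Int × Int × String)) × List (List Int) × List Bool) : Decidable (Spec_proximity_filter_entitychunk la lb threshold out) := by unfold Spec_proximity_filter_entitychunk; infer_instance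

-- ===== CLAIM (what is proved, stated in full; the proofs are below) =====
def Claim_equal_proximity_filter_entitychunk : Prop := ∀ (la : List (Int × Int × String)) (lb : List Int) (threshold : Int), Dom_proximity_filter_entitychunk la lb threshold → Spec_proximity_filter_entitychunk la lb threshold (proximity_filter_entitychunk la lb threshold)

-- ===== LEMMAS AND PROOFS =====

-- A's inner loop over lb is the filter by the proximity condition plus the "no point inside" flag
lemma pv_A_inner (s e t : Int) (lb : List Int) (acc : List Int) (u : Bool) :
    lb.foldl (fun tu b =>
      if (s ≤ b ∧ b ≤ e) ∨ min |s - b| |e - b| < t then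
        (tu.1 ++ [b], if s ≤ b ∧ b ≤ e then false else tu.2)
      else tu) (acc, u)
    = (acc ++ lb.filter (fun b => decide ((s ≤ b ∧ b ≤ e) ∨ min |s - b| |e - b| < t)),
       u && !(lb.any (fun b => decide (s ≤ b ∧ b ≤ e)))) := by
  induction lb generalizing acc u with
  | nil => simp
  | cons b bs ih =>
    rw [List.foldl_cons]
    by_cases hc : (s ≤ b ∧ b ≤ e) ∨ min |s - b| |e - b| < t
    · by_cases hin : s ≤ b ∧ b ≤ e
      · rw [if_pos hc, if_pos hin, ih]
        simp [hin, List.append_assoc]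
      · rw [if_pos hc, if_neg hin, ih]
        rcases hc with h | h
        · exact absurd h hin
        · rcases min_lt_iff.mp h with h' | h' <;>
            · simp [h', List.append_assoc]
              rcases not_and_or.mp hin with hz | hz <;> simp [hz]
    · have hin : ¬(s ≤ b ∧ b ≤ e) := fun h => hc (Or.inl h)
      have h1 : ¬ |s - b| < t := fun h => hc (Or.inr (min_lt_iff.mpr (Or.inl h)))
      have h2 : ¬ |e - b| < t := fun h => hc (Or.inr (min_lt_iff.mpr (Or.inr h)))
      rw [if_neg hc, ih]
      simp [hin, h1, h2]
      rcases not_and_or.mp hin with hz | hz <;> simp [hz]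

-- the bisect slice of a value-sorted pair list is the filter by the value range
lemma pv_seg_eq_filter (ps : List (Int × Int)) (lo hi : Int)
    (hs : List.Pairwise (fun a b : Int => a ≤ b) (ps.map (fun p => p.2))) :
    pvSeg ps (ps.map (fun p => p.2)) lo hi
      = ps.filter (fun p => decide (lo ≤ p.2 ∧ p.2 ≤ hi)) := by
  obtain ⟨hl_le, hl_lt, hl_ge⟩ := PySem.List.bisectLeft_spec (ps.map (fun p => p.2)) lo hs
  obtain ⟨hr_le, hr_lt, hr_gt⟩ := PySem.List.bisectRight_spec (ps.map (fun p => p.2)) hi hs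
  set l := PySem.List.bisectLeft (ps.map (fun p => p.2)) lo with hldef
  set r := PySem.List.bisectRight (ps.map (fun p => p.2)) hi with hrdef
  have hlen : (ps.map (fun p => p.2)).length = ps.length := List.length_map ..
  have hidx : ∀ (j : Nat) (hj : j < ps.length),
      (decide (lo ≤ (ps[j]'hj).2 ∧ (ps[j]'hj).2 ≤ hi) = true) ↔ (l ≤ j ∧ j < r) := by
    intro j hj
    have hjv : j < (ps.map (fun p => p.2)).length := by omega
    have hv : (ps.map (fun p => p.2))[j]'hjv = (ps[j]'hj).2 := List.getElem_map ..
    constructor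
    · intro h
      rw [decide_eq_true_iff] at h
      constructor
      · by_contra hlt
        rw [not_le] at hlt
        have := hl_lt j hjv (by omega)
        rw [hv] at this; omega
      · by_contra hge
        rw [not_lt] at hge
        have := hr_gt j hjv (by omega)
        rw [hv] at this; omega
    · rintro ⟨h1, h2⟩
      have ha := hl_ge j hjv h1
      have hb := hr_lt j hjv h2
      rw [hv] at ha hb
      rw [decide_eq_true_iff]
      omega
  unfold pvSeg
  rw [← hldef, ← hrdef, PySem.List.slice_natCast]
  conv_rhs => rw [← List.take_append_drop l ps]
  rw [List.filter_append]
  have h1 : (ps.take l).filter (fun p => decide (lo ≤ p.2 ∧ p.2 ≤ hi)) = [] := by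
    rw [List.filter_eq_nil_iff]
    intro x hx
    obtain ⟨i, hilt, hieq⟩ := List.mem_iff_getElem.mp hx
    have hi1 : i < l := by
      have := hilt; rw [List.length_take] at this; omega
    have hi2 : i < ps.length := by
      have := hilt; rw [List.length_take] at this; omega
    have hxe : x = ps[i]'hi2 := by rw [← hieq, List.getElem_take]
    rw [hxe, hidx i hi2]
    omega
  rw [h1, List.nil_append]
  conv_rhs => rw [← List.take_append_drop (r - l) (ps.drop l)]
  rw [List.filter_append]
  have h2 : ((ps.drop l).take (r - l)).filter (fun p => decide (lo ≤ p.2 ∧ p.2 ≤ hi))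
      = (ps.drop l).take (r - l) := by
    rw [List.filter_eq_self]
    intro x hx
    obtain ⟨i, hilt, hieq⟩ := List.mem_iff_getElem.mp hx
    have hb1 : i < r - l ∧ i < ps.length - l := by
      have := hilt; rw [List.length_take, List.length_drop] at this; omega
    have hj : l + i < ps.length := by omega
    have hxe : x = ps[l + i]'hj := by
      rw [← hieq, List.getElem_take, List.getElem_drop]
    rw [hxe, hidx (l + i) hj]
    omega
  have h3 : ((ps.drop l).drop (r - l)).filter (fun p => decide (lo ≤ p.2 ∧ p.2 ≤ hi)) = [] := by
    rw [List.drop_drop, List.filter_eq_nil_iff]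
    intro x hx
    obtain ⟨i, hilt, hieq⟩ := List.mem_iff_getElem.mp hx
    have hb1 : l + (r - l) + i < ps.length := by
      have := hilt; rw [List.length_drop] at this; omega
    have hxe : x = ps[l + (r - l) + i]'hb1 := by rw [← hieq, List.getElem_drop]
    rw [hxe, hidx _ hb1]
    omega
  rw [h2, h3, List.append_nil]

-- bisect_left(vals, s) < bisect_right(vals, e) detects a value in [s, e]
lemma pv_bisect_lt_iff (vals : List Int) (s e : Int)
    (hs : List.Pairwise (fun a b : Int => a ≤ b) vals) :
    PySem.List.bisectLeft vals s < PySem.List.bisectRight vals e ↔ ∃ v ∈ vals, s ≤ v ∧ v ≤ e := by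
  obtain ⟨hl_le, hl_lt, hl_ge⟩ := PySem.List.bisectLeft_spec vals s hs
  obtain ⟨hr_le, hr_lt, hr_gt⟩ := PySem.List.bisectRight_spec vals e hs
  constructor
  · intro h
    have hlt : PySem.List.bisectLeft vals s < vals.length := by omega
    refine ⟨vals[PySem.List.bisectLeft vals s]'hlt, List.getElem_mem hlt, ?_, ?_⟩
    · exact hl_ge _ hlt (le_refl _)
    · exact hr_lt _ hlt h
  · rintro ⟨v, hv, h1, h2⟩
    obtain ⟨j, hj, hje⟩ := List.mem_iff_getElem.mp hv
    have ha : PySem.List.bisectLeft vals s ≤ j := by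
      by_contra hn
      rw [not_le] at hn
      have := hl_lt j hj hn
      omega
    have hb : j < PySem.List.bisectRight vals e := by
      by_contra hn
      rw [not_lt] at hn
      have := hr_gt j hj hn
      omega
    omega

lemma pv_mem_foldl_update (g : Int × Int → List (Int × Int)) (rs : List (Int × Int))
    (s : PySem.Set (Int × Int)) (p : Int × Int) :
    p ∈ rs.foldl (fun h r => PySem.Set.update h (g r)) s ↔ p ∈ s ∨ ∃ r ∈ rs, p ∈ g r := by
  induction rs generalizing s with
  | nil => simp
  | cons r rs ih =>
    rw [List.foldl_cons, ih]
    simp [PySem.Set.mem_update, or_assoc]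

lemma pv_nodup_foldl_update (g : Int × Int → List (Int × Int)) (rs : List (Int × Int))
    (s : PySem.Set (Int × Int)) (hs : s.Nodup) :
    (rs.foldl (fun h r => PySem.Set.update h (g r)) s).Nodup := by
  induction rs generalizing s with
  | nil => exact hs
  | cons r rs ih => exact ih _ (PySem.Set.nodup_update _ _ hs)

lemma pv_mem_pvHits (pairs : List (Int × Int)) (vals : List Int) (rs : List (Int × Int)) (p : Int × Int) :
    p ∈ pvHits pairs vals rs ↔ ∃ r ∈ rs, p ∈ pvSeg pairs vals r.1 r.2 := by
  unfold pvHits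
  rw [pv_mem_foldl_update]
  simp [PySem.Set.empty]

lemma pv_nodup_pvHits (pairs : List (Int × Int)) (vals : List Int) (rs : List (Int × Int)) :
    (pvHits pairs vals rs).Nodup := by
  unfold pvHits
  exact pv_nodup_foldl_update _ _ _ (by simp [PySem.Set.empty])

-- the proximity condition is membership in the union of the (at most three) value ranges
lemma pv_cond_iff (s e t b : Int) :
    ((s ≤ b ∧ b ≤ e) ∨ min |s - b| |e - b| < t) ↔ ∃ r ∈ pvRanges s e t, r.1 ≤ b ∧ b ≤ r.2 := by
  unfold pvRanges
  rcases abs_cases (s - b) with ⟨hs1, hs2⟩ | ⟨hs1, hs2⟩ <;>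
    rcases abs_cases (e - b) with ⟨he1, he2⟩ | ⟨he1, he2⟩ <;>
      rw [hs1, he1] <;> split_ifs with h1 h2 h2 <;> simp <;> omega

lemma pv_filter_enum_map (q : Int → Bool) (lb : List Int) (s0 : Int) :
    ((PySem.List.enumerate lb s0).filter (fun p => q p.2)).map (fun p => p.2) = lb.filter q := by
  induction lb generalizing s0 with
  | nil => simp [PySem.List.enumerate_nil]
  | cons b bs ih =>
    simp only [PySem.List.enumerate_cons, List.filter_cons]
    by_cases hq : q b <;> simp [hq, ih]

-- per-entity: B's step equals A's step
lemma pv_step_eq (lb : List Int) (t s e : Int) (str : String)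
    (st : (List (Int × Int × String)) × List (List Int) × List Bool) :
    pvStepA lb t st (s, e, str) = pvStepB (pvPairs lb) ((pvPairs lb).map (fun p => p.2)) t st (s, e, str) := by
  have hsorted : List.Pairwise (fun x y : Int => x ≤ y) ((pvPairs lb).map (fun p => p.2)) :=
    (List.pairwise_map).mpr (PySem.List.sorted_pairwise (PySem.List.enumerate lb) (fun p : Int × Int => p.2))
  have hmem : ∀ p : Int × Int,
      p ∈ pvHits (pvPairs lb) ((pvPairs lb).map (fun p => p.2)) (pvRanges s e t)
      ↔ p ∈ PySem.List.enumerate lb ∧ ((s ≤ p.2 ∧ p.2 ≤ e) ∨ min |s - p.2| |e - p.2| < t) := by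
    intro p
    rw [pv_mem_pvHits]
    constructor
    · rintro ⟨r, hr, hp⟩
      rw [pv_seg_eq_filter _ _ _ hsorted, List.mem_filter, decide_eq_true_iff] at hp
      exact ⟨(PySem.List.mem_sorted _ _ _ _).mp hp.1, (pv_cond_iff s e t p.2).mpr ⟨r, hr, hp.2⟩⟩
    · rintro ⟨hp, hc⟩
      obtain ⟨r, hr, h1, h2⟩ := (pv_cond_iff s e t p.2).mp hc
      refine ⟨r, hr, ?_⟩
      rw [pv_seg_eq_filter _ _ _ hsorted, List.mem_filter, decide_eq_true_iff]
      exact ⟨(PySem.List.mem_sorted _ _ _ _).mpr hp, h1, h2⟩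
  have hpw : ((PySem.List.enumerate lb).filter
      (fun p => decide ((s ≤ p.2 ∧ p.2 ≤ e) ∨ min |s - p.2| |e - p.2| < t))).Pairwise
        (fun p q : Int × Int => p.1 < q.1) :=
    (PySem.List.pairwise_lt_enumerate lb 0).filter _
  have hnys : ((PySem.List.enumerate lb).filter
      (fun p => decide ((s ≤ p.2 ∧ p.2 ≤ e) ∨ min |s - p.2| |e - p.2| < t))).Nodup :=
    hpw.imp (fun {a b} h heq => by rw [heq] at h; exact lt_irrefl _ h)
  have hperm : ((PySem.List.enumerate lb).filter
      (fun p => decide ((s ≤ p.2 ∧ p.2 ≤ e) ∨ min |s - p.2| |e - p.2| < t))).Perm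
        (pvHits (pvPairs lb) ((pvPairs lb).map (fun p => p.2)) (pvRanges s e t)) := by
    rw [List.perm_ext_iff_of_nodup hnys (pv_nodup_pvHits _ _ _)]
    intro p
    rw [List.mem_filter, decide_eq_true_iff, hmem]
  have hsorteq : PySem.List.sorted
      (pvHits (pvPairs lb) ((pvPairs lb).map (fun p => p.2)) (pvRanges s e t)) (fun p => p.1)
      = (PySem.List.enumerate lb).filter
          (fun p => decide ((s ≤ p.2 ∧ p.2 ≤ e) ∨ min |s - p.2| |e - p.2| < t)) :=
    PySem.List.sorted_eq_of_perm_of_pairwise_lt _ _ _ hperm hpw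
  have htmp : ((PySem.List.enumerate lb).filter
      (fun p => decide ((s ≤ p.2 ∧ p.2 ≤ e) ∨ min |s - p.2| |e - p.2| < t))).map (fun p => p.2)
      = lb.filter (fun b => decide ((s ≤ b ∧ b ≤ e) ∨ min |s - b| |e - b| < t)) :=
    pv_filter_enum_map (fun b => decide ((s ≤ b ∧ b ≤ e) ∨ min |s - b| |e - b| < t)) lb 0
  have hlen : (pvHits (pvPairs lb) ((pvPairs lb).map (fun p => p.2)) (pvRanges s e t)).length
      = (lb.filter (fun b => decide ((s ≤ b ∧ b ≤ e) ∨ min |s - b| |e - b| < t))).length := by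
    rw [← htmp, List.length_map, hperm.length_eq]
  have hvals_mem : ∀ v : Int, v ∈ (pvPairs lb).map (fun p => p.2) ↔ v ∈ lb := by
    intro v
    constructor
    · intro h
      obtain ⟨p, hp, rfl⟩ := List.mem_map.mp h
      have hp' : p ∈ PySem.List.enumerate lb := (PySem.List.mem_sorted _ _ _ _).mp hp
      rw [← PySem.List.map_snd_enumerate lb 0]
      exact List.mem_map_of_mem hp'
    · intro h
      rw [← PySem.List.map_snd_enumerate lb 0] at h
      obtain ⟨p, hp, rfl⟩ := List.mem_map.mp h
      exact List.mem_map.mpr ⟨p, (PySem.List.mem_sorted _ _ _ _).mpr hp, rfl⟩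
  have hflag : (lb.any (fun b => decide (s ≤ b ∧ b ≤ e)))
      = decide (PySem.List.bisectLeft ((pvPairs lb).map (fun p => p.2)) s
          < PySem.List.bisectRight ((pvPairs lb).map (fun p => p.2)) e) := by
    rw [Bool.eq_iff_iff]
    rw [decide_eq_true_iff, pv_bisect_lt_iff _ _ _ hsorted, List.any_eq_true]
    constructor
    · rintro ⟨b, hb, hd⟩
      rw [decide_eq_true_iff] at hd
      exact ⟨b, (hvals_mem b).mpr hb, hd⟩
    · rintro ⟨v, hv, h1, h2⟩
      exact ⟨v, (hvals_mem v).mp hv, by rw [decide_eq_true_iff]; exact ⟨h1, h2⟩⟩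
  unfold pvStepA pvStepB
  have hA : lb.foldl (fun tu b =>
      if (s ≤ b ∧ b ≤ e) ∨ min |s - b| |e - b| < t then
        (tu.1 ++ [b], if s ≤ b ∧ b ≤ e then false else tu.2)
      else tu) ([], true)
      = (lb.filter (fun b => decide ((s ≤ b ∧ b ≤ e) ∨ min |s - b| |e - b| < t)),
         !(lb.any (fun b => decide (s ≤ b ∧ b ≤ e)))) := by
    rw [pv_A_inner s e t lb [] true]
    simp
  rw [hA]
  simp only
  by_cases hne : (lb.filter (fun b => decide ((s ≤ b ∧ b ≤ e) ∨ min |s - b| |e - b| < t))).length = 0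
  · have hhits : pvHits (pvPairs lb) ((pvPairs lb).map (fun p => p.2)) (pvRanges s e t) = [] := by
      rw [← List.length_eq_zero_iff, hlen]; exact hne
    rw [if_neg (by simpa using hne), if_neg (by simpa using hhits)]
  · have hhits : pvHits (pvPairs lb) ((pvPairs lb).map (fun p => p.2)) (pvRanges s e t) ≠ [] := by
      rw [Ne, ← List.length_eq_zero_iff, hlen]; exact hne
    rw [if_pos hne, if_pos hhits, hsorteq, htmp, decide_not, ← hflag]

-- ===== VERDICT (by name: the statement is the Claim_ definition above) =====
theorem proximity_filter_entitychunk_spec : Claim_equal_proximity_filter_entitychunk := by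
  intro la lb t _
  unfold Spec_proximity_filter_entitychunk proximity_filter_entitychunk proximity_filter_entitychunk_alt
  have h : ∀ (l : List (Int × Int × String)) st,
      l.foldl (pvStepA lb t) st = l.foldl (pvStepB (pvPairs lb) ((pvPairs lb).map (fun p => p.2)) t) st := by
    intro l
    induction l with
    | nil => intro st; rfl
    | cons a l ih =>
      intro st
      obtain ⟨s, e, str⟩ := a
      rw [List.foldl_cons, List.foldl_cons, pv_step_eq, ih]
  exact h la ([], [], [])
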